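-- pv_equiv track=rewrite | github.com/Jeg0g/CS331Assignments | Assignment1.py | art
-- ===== SOURCE A (Python) =====
-- def art(s: str) -> str:
--     outstr=""
--     for i in range(1,len(s)):
--         tempstr=s[::-1][:i][::-1]
--         temp3=""
--         for j in range(len(tempstr)-1):
--             temp3+=tempstr[j]+"."
--         temp3+=tempstr[len(tempstr)-1]
--         temp3+=".."*(len(s)-i)
--         temp2=temp3[1:][::-1]+temp3
--         outstr+=temp2+"\n"
--     revoutstr=outstr[::-1]
--     tempstr=s
--     temp3=""
--     for j in range(len(tempstr)-1):
--         temp3+=tempstr[j]+"."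
--     temp3+=tempstr[len(tempstr)-1]
--     temp3+=".."*(len(s)-len(s))
--     temp2=temp3[1:][::-1]+temp3
--     outstr+=temp2
--     outstr+=revoutstr
--     return outstr
-- ===== SOURCE B (Python) =====
-- def art(s: str) -> str:
--     n = len(s)
--     mid = '.'.join(s[::-1] + s[1:])
--     rows = []
--     for r in range(2 * n - 1):
--         d = 2 * abs(r - (n - 1))
--         rows.append('.' * d + mid[:2 * n - 2 - d] + mid[2 * n - 2 + d:] + '.' * d)
--     return '\n'.join(rows)
-- ===== Notes on version B (the rewrite author's own statement) =====
-- stated objective: faster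
-- what changed: B builds the widest (middle) row once as a master string (dot-join of s reversed plus s[1:]) and derives every other row from it by cutting out its centre slice and padding with dots (two C-speed slices per row), instead of A's per-row construction via per-character Python loops, string mirroring and reversal of the accumulated output.
import Mathlib
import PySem

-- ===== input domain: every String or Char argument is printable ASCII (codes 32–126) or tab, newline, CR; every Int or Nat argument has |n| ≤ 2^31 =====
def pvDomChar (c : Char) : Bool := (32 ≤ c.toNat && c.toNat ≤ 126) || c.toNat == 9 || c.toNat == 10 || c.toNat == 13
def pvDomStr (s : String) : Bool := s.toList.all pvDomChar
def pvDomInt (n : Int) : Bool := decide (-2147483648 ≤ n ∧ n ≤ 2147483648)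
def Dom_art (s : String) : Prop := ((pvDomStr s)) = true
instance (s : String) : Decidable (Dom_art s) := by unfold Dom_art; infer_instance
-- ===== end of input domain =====

-- B builds the widest (middle) row once and derives every other row from it by cutting out its
-- centre slice and padding with dots, instead of A's per-row construction with character loops,
-- string mirroring and reversal of the accumulated output (objective: alternative algorithm).
-- Pre_art excludes the empty string, on which A raises IndexError.


-- Python string repetition cs * k (empty for k ≤ 0); shared builtin helper, exact.
def pyRepeat (cs : List Char) (k : Int) : List Char := List.flatten (List.replicate k.toNat cs)

-- ===== PORT A =====
def art (s : String) : String :=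
  let cs := s.toList
  let n := cs.length
  let outstr := (PySem.List.pyRange 1 n 1).foldl (fun outstr i =>
    let tempstr :=
      (PySem.List.slice? (PySem.List.slice ((PySem.List.slice? cs none none (-1)).getD [])
        none (some i)) none none (-1)).getD []
    let temp3 := (PySem.List.pyRange 0 ((tempstr.length : Int) - 1) 1).foldl
      (fun temp3 j => temp3 ++ [PySem.List.pyGetD tempstr j ' '] ++ ['.']) []
    let temp3 := temp3 ++ [PySem.List.pyGetD tempstr ((tempstr.length : Int) - 1) ' ']
    let temp3 := temp3 ++ pyRepeat ['.', '.'] ((n : Int) - i)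
    let temp2 := (PySem.List.slice? (PySem.List.slice temp3 (some 1) none) none none (-1)).getD [] ++ temp3
    outstr ++ temp2 ++ ['\n']) []
  let revoutstr := (PySem.List.slice? outstr none none (-1)).getD []
  let tempstr := cs
  let temp3 := (PySem.List.pyRange 0 ((tempstr.length : Int) - 1) 1).foldl
    (fun temp3 j => temp3 ++ [PySem.List.pyGetD tempstr j ' '] ++ ['.']) []
  let temp3 := temp3 ++ [PySem.List.pyGetD tempstr ((tempstr.length : Int) - 1) ' ']
  let temp3 := temp3 ++ pyRepeat ['.', '.'] ((n : Int) - (n : Int))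
  let temp2 := (PySem.List.slice? (PySem.List.slice temp3 (some 1) none) none none (-1)).getD [] ++ temp3
  String.ofList (outstr ++ temp2 ++ revoutstr)

-- ===== PORT B =====
-- one loop-body row from Source B: dot padding + the master middle row with its centre cut out
def rowB (mid : List Char) (n r : Int) : List Char :=
  let d := 2 * |r - (n - 1)|
  pyRepeat ['.'] d ++ PySem.List.slice mid none (some (2 * n - 2 - d))
    ++ PySem.List.slice mid (some (2 * n - 2 + d)) none ++ pyRepeat ['.'] d

def art_alt (s : String) : String :=
  let cs := s.toList
  let n := cs.length
  let mid := PySem.Chars.join ['.']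
    ((((PySem.List.slice? cs none none (-1)).getD []) ++ PySem.List.slice cs (some 1) none).map
      (fun c => [c]))
  String.ofList (PySem.Chars.join ['\n']
    ((PySem.List.pyRange 0 (2 * (n : Int) - 1) 1).map (fun r => rowB mid (n : Int) r)))

-- ===== PRECONDITION & SPEC =====
-- Pre_art excludes exactly the empty string, on which A raises IndexError.
def Pre_art (s : String) : Prop := s ≠ ""
instance (s : String) : Decidable (Pre_art s) := by unfold Pre_art; infer_instance
def pvWitness_art : String := "ab"

def Spec_art (s : String) (out : String) : Prop := out = art_alt s
instance (s : String) (out : String) : Decidable (Spec_art s out) := by unfold Spec_art; infer_instance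

-- ===== CLAIM (what is proved, stated in full; the proofs are below) =====
def Claim_equal_art : Prop := ∀ (s : String), Dom_art s → Pre_art s → Spec_art s (art s)

-- ===== LEMMAS AND PROOFS =====

-- the dotted half row '.'.join(u) and one full symmetric row, proof-side vocabulary
def dotted (u : List Char) : List Char := PySem.Chars.join ['.'] (u.map (fun c => [c]))
def tl (cs : List Char) (dr : Nat) : List Char :=
  dotted (cs.drop dr) ++ List.replicate (2 * dr) '.'
def Rrow (cs : List Char) (dr : Nat) : List Char := ((tl cs dr).drop 1).reverse ++ tl cs dr
def artRow (cs : List Char) (n : Nat) (i : Int) : List Char :=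
  let t := PySem.Chars.join ['.'] ((PySem.List.slice cs (some ((n : Int) - i)) none).map (fun c => [c]))
           ++ pyRepeat ['.', '.'] ((n : Int) - i)
  (t.drop 1).reverse ++ t
def topRows (cs : List Char) : List (List Char) :=
  (PySem.List.pyRange 1 (cs.length : Int) 1).map (artRow cs cs.length)

theorem dotted_core : ∀ (t : List Char) (c : Char),
    (List.range (t.length)).flatMap (fun k => [(c :: t).getD k ' ', '.'])
      ++ [(c :: t).getD t.length ' ']
    = PySem.Chars.join ['.'] ((c :: t).map (fun x => [x])) := by
  intro t
  induction t with
  | nil => intro c; simp [PySem.Chars.join_singleton]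
  | cons d t ih =>
    intro c
    rw [List.map_cons, List.map_cons, PySem.Chars.join_cons_cons, show ([d] : List Char) :: List.map (fun x => [x]) t = List.map (fun x => [x]) (d :: t) from rfl]
    rw [show (d :: t).length = t.length + 1 from rfl, List.range_succ_eq_map]
    simp only [List.flatMap_cons, List.getD_cons_zero, List.flatMap_map]
    have : ∀ k : Nat, (c :: d :: t).getD (Nat.succ k) ' ' = (d :: t).getD k ' ' := fun k => rfl
    simp only [this]
    rw [List.append_assoc, ih d]
    simp

theorem dotted_port (u : List Char) (hu : u ≠ []) :
    ((PySem.List.pyRange 0 ((u.length : Int) - 1) 1).foldl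
        (fun a j => a ++ [PySem.List.pyGetD u j ' '] ++ ['.']) [])
      ++ [PySem.List.pyGetD u ((u.length : Int) - 1) ' ']
    = PySem.Chars.join ['.'] (u.map (fun c => [c])) := by
  obtain ⟨c, t, rfl⟩ := List.ne_nil_iff_exists_cons.mp hu
  have hb : (((c :: t).length : Int) - 1) = ((t.length : Nat) : Int) := by
    simp [List.length_cons]
  rw [hb]
  have hf : (fun (a : List Char) (j : Int) => a ++ [PySem.List.pyGetD (c :: t) j ' '] ++ ['.'])
      = fun a j => a ++ ([PySem.List.pyGetD (c :: t) j ' '] ++ ['.']) := by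
    funext a j; simp
  rw [hf, PySem.List.foldl_append_eq_flatMap, PySem.List.pyRange_one]
  simp only [Int.sub_zero, Int.toNat_natCast, List.flatMap_map, Int.zero_add,
    PySem.List.pyGetD_natCast, List.nil_append]
  exact dotted_core t c

theorem tempstr_eq (cs : List Char) (i : Int) (h1 : 1 ≤ i) :
    (PySem.List.slice? (PySem.List.slice ((PySem.List.slice? cs none none (-1)).getD [])
      none (some i)) none none (-1)).getD []
    = cs.drop (cs.length - i.toNat) := by
  rw [show (PySem.List.slice? cs none none (-1)).getD [] = cs.reverse from by
        rw [PySem.List.slice?_none_none_neg_one]; rfl,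
      PySem.List.slice_to cs.reverse (show (0:Int) ≤ i by omega),
      PySem.List.slice?_none_none_neg_one, Option.getD_some,
      List.take_reverse, List.reverse_reverse]

theorem join_map_singleton_head (c : Char) (r : List Char) :
    ∃ u, PySem.Chars.join ['.'] ((c :: r).map (fun x => [x])) = c :: u := by
  cases r with
  | nil => exact ⟨[], by simp [PySem.Chars.join_singleton]⟩
  | cons d r =>
    refine ⟨'.' :: (PySem.Chars.join ['.'] ((d :: r).map (fun x => [x]))), ?_⟩
    rw [List.map_cons, List.map_cons, PySem.Chars.join_cons_cons,
      show ([d] : List Char) :: List.map (fun x => [x]) r = List.map (fun x => [x]) (d :: r) from rfl]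
    simp

theorem mirror_palindrome (c : Char) (v : List Char) :
    (((c :: v).drop 1).reverse ++ (c :: v)).reverse = ((c :: v).drop 1).reverse ++ (c :: v) := by
  simp

theorem mirror_of (t : List Char) :
    (PySem.List.slice? (PySem.List.slice t (some 1) none) none none (-1)).getD [] ++ t
    = (t.drop 1).reverse ++ t := by
  rw [PySem.List.slice_from_one, PySem.List.slice?_none_none_neg_one, Option.getD_some,
      List.drop_one]

theorem join_cons_ne (sep p : List Char) (rest : List (List Char)) (h : rest ≠ []) :
    PySem.Chars.join sep (p :: rest) = p ++ sep ++ PySem.Chars.join sep rest := by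
  obtain ⟨q, rest, rfl⟩ := List.ne_nil_iff_exists_cons.mp h
  exact PySem.Chars.join_cons_cons sep p q rest

theorem join_head_split : ∀ (R : List (List Char)) (m : List Char),
    PySem.Chars.join ['\n'] (m :: R) = m ++ (R.map (fun r => '\n' :: r)).flatten := by
  intro R
  induction R with
  | nil => intro m; simp [PySem.Chars.join_singleton]
  | cons a R ih =>
    intro m
    rw [PySem.Chars.join_cons_cons, ih a]
    simp

theorem join_split (L : List (List Char)) (m : List Char) (R : List (List Char)) :
    PySem.Chars.join ['\n'] (L ++ [m] ++ R)
    = (L.map (fun r => r ++ ['\n'])).flatten ++ m ++ (R.map (fun r => '\n' :: r)).flatten := by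
  induction L with
  | nil => simp [join_head_split]
  | cons a L ih =>
    rw [List.cons_append, List.cons_append, join_cons_ne _ _ _ (by simp), ih]
    simp

theorem artRow_palindrome (cs : List Char) (i : Int) (h1 : 1 ≤ i) (h2 : i ≤ (cs.length : Int)) :
    (artRow cs cs.length i).reverse = artRow cs cs.length i := by
  simp only [artRow]
  rw [PySem.List.slice_from cs (by omega)]
  have hne : cs.drop ((cs.length : Int) - i).toNat ≠ [] := by
    rw [Ne, List.drop_eq_nil_iff]
    omega
  obtain ⟨c, r, hcr⟩ := List.ne_nil_iff_exists_cons.mp hne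
  rw [hcr]
  obtain ⟨u, hu⟩ := join_map_singleton_head c r
  rw [hu]
  rw [show ((c :: u) ++ pyRepeat ['.', '.'] ((cs.length : Int) - i))
        = c :: (u ++ pyRepeat ['.', '.'] ((cs.length : Int) - i)) from rfl]
  exact mirror_palindrome c _

theorem art_eq_join (s : String) (hp : s ≠ "") :
    art s = String.ofList (PySem.Chars.join ['\n']
      (topRows s.toList
        ++ [artRow s.toList s.toList.length (s.toList.length : Int)]
        ++ (topRows s.toList).reverse)) := by
  have hcs : s.toList ≠ [] := fun h => hp (String.toList_eq_nil_iff.mp h)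
  simp only [art, topRows]
  generalize s.toList = cs at hcs ⊢
  rw [PySem.List.foldl_congr_mem _ _
        (fun (o : List Char) (i : Int) => o ++ (artRow cs cs.length i ++ ['\n'])) [] ?hb]
  case hb =>
    intro acc i hi
    rw [PySem.List.mem_pyRange_one] at hi
    rw [tempstr_eq cs i hi.1]
    have hune : cs.drop (cs.length - i.toNat) ≠ [] := by
      rw [Ne, List.drop_eq_nil_iff]
      omega
    rw [dotted_port _ hune, mirror_of]
    simp only [artRow]
    rw [PySem.List.slice_from cs (by omega : (0:Int) ≤ (cs.length : Int) - i)]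
    rw [show ((cs.length : Int) - i).toNat = cs.length - i.toNat from by omega]
    simp
  rw [PySem.List.foldl_append_eq_flatMap (fun i => artRow cs cs.length i ++ ['\n'])
        (PySem.List.pyRange 1 (cs.length : Int) 1) []]
  rw [dotted_port cs hcs]
  rw [show pyRepeat ['.', '.'] ((cs.length : Int) - (cs.length : Int)) = ([] : List Char) from by
        simp [pyRepeat]]
  rw [List.append_nil, mirror_of]
  rw [PySem.List.slice?_none_none_neg_one, Option.getD_some]
  have hmid : artRow cs cs.length ((cs.length : Int))
      = (List.drop 1 (PySem.Chars.join ['.'] (List.map (fun c => [c]) cs))).reverse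
        ++ PySem.Chars.join ['.'] (List.map (fun c => [c]) cs) := by
    simp only [artRow]
    rw [PySem.List.slice_from cs (by omega)]
    simp [pyRepeat]
  rw [join_split, hmid]
  have h1 : List.flatMap (fun i => artRow cs cs.length i ++ ['\n']) (PySem.List.pyRange 1 (cs.length : Int) 1)
      = (((PySem.List.pyRange 1 (cs.length : Int) 1).map (artRow cs cs.length)).map
          (fun r => r ++ ['\n'])).flatten := by
    simp [List.flatMap_def, List.map_map, Function.comp_def]
  have h3 : (List.flatMap (fun i => artRow cs cs.length i ++ ['\n']) (PySem.List.pyRange 1 (cs.length : Int) 1)).reverse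
      = (((PySem.List.pyRange 1 (cs.length : Int) 1).map (artRow cs cs.length)).reverse.map
          (fun r => '\n' :: r)).flatten := by
    rw [List.flatMap_def, List.reverse_flatten, List.map_map]
    rw [List.map_congr_left (g := fun i => '\n' :: artRow cs cs.length i) (fun i hi => ?_)]
    · simp [List.map_reverse, List.map_map, Function.comp_def]
    · rw [PySem.List.mem_pyRange_one] at hi
      simp only [Function.comp]
      rw [List.reverse_append, artRow_palindrome cs i hi.1 (le_of_lt hi.2)]
      rfl
  rw [h1] at h3 ⊢
  simp only [List.nil_append]
  rw [h3]

-- ---------- B-side lemmas ----------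

def midL (cs : List Char) : List Char := dotted (cs.reverse ++ cs.drop 1)

theorem getD_drop (l : List Char) (i j : Nat) (d : Char) :
    (l.drop i).getD j d = l.getD (i + j) d := by
  simp [List.getD_eq_getElem?_getD, List.getElem?_drop]

theorem getD_take (l : List Char) (m j : Nat) (d : Char) (h : j < m) :
    (l.take m).getD j d = l.getD j d := by
  simp [List.getD_eq_getElem?_getD, h]

theorem getD_replicate_dot (m j : Nat) : (List.replicate m '.').getD j '.' = '.' := by
  simp [List.getD_eq_getElem?_getD, List.getElem?_replicate]
  split <;> rfl

theorem getD_append' (xs ys : List Char) (k : Nat) (d : Char) :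
    (xs ++ ys).getD k d = if k < xs.length then xs.getD k d else ys.getD (k - xs.length) d := by
  simp [List.getD_eq_getElem?_getD, List.getElem?_append]
  split <;> rfl

theorem cast_dist (m n : Nat) : ((Nat.dist m n : Nat) : Int) = |(m : Int) - (n : Int)| := by
  rcases le_total m n with h | h
  · rw [abs_of_nonpos (by omega)]; simp [Nat.dist]; omega
  · rw [abs_of_nonneg (by omega)]; simp [Nat.dist]; omega

theorem dotted_getD : ∀ (u : List Char) (k : Nat),
    (dotted u).getD k '.' = if k % 2 = 0 then u.getD (k / 2) '.' else '.'
  | [], k => by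
    simp only [dotted, List.map_nil, PySem.Chars.join_nil]
    rw [List.getD_eq_default _ _ (by simp)]
    split_ifs with h
    · rw [List.getD_eq_default _ _ (by simp)]
    · rfl
  | [a], k => by
    rw [show dotted [a] = [a] from by simp [dotted, PySem.Chars.join_singleton]]
    cases k with
    | zero => simp
    | succ k =>
      rw [List.getD_eq_default _ _ (by simp)]
      split_ifs with h
      · rw [List.getD_eq_default]
        simp only [List.length_cons, List.length_nil]
        omega
      · rfl
  | a :: b :: v, k => by
    have hjoin : dotted (a :: b :: v) = a :: '.' :: dotted (b :: v) := by
      simp [dotted, List.map_cons, PySem.Chars.join_cons_cons]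
    rw [hjoin]
    match k with
    | 0 => simp
    | 1 => simp
    | (k + 2) =>
      have ih := dotted_getD (b :: v) k
      simp only [List.getD_cons_succ]
      rw [ih, show (k + 2) % 2 = k % 2 from by omega, show (k + 2) / 2 = k / 2 + 1 from by omega]
      split_ifs <;> simp

theorem dotted_length : ∀ (u : List Char), u ≠ [] → (dotted u).length = 2 * u.length - 1
  | [], h => absurd rfl h
  | [a], _ => by simp [dotted, PySem.Chars.join_singleton]
  | a :: b :: v, _ => by
    have hjoin : dotted (a :: b :: v) = a :: '.' :: dotted (b :: v) := by
      simp [dotted, List.map_cons, PySem.Chars.join_cons_cons]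
    rw [hjoin]
    have ih := dotted_length (b :: v) (by simp)
    simp only [List.length_cons, ih]
    omega

theorem tl_length (cs : List Char) (dr : Nat) (h : dr < cs.length) :
    (tl cs dr).length = 2 * cs.length - 1 := by
  have hne : cs.drop dr ≠ [] := by rw [Ne, List.drop_eq_nil_iff]; omega
  simp only [tl, List.length_append, List.length_replicate,
    dotted_length _ hne, List.length_drop]
  omega

theorem tl_getD (cs : List Char) (dr : Nat) (h : dr < cs.length) (k : Nat) :
    (tl cs dr).getD k '.' = if k % 2 = 0 then cs.getD (dr + k / 2) '.' else '.' := by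
  have hne : cs.drop dr ≠ [] := by rw [Ne, List.drop_eq_nil_iff]; omega
  have hd : (dotted (cs.drop dr)).length = 2 * (cs.length - dr) - 1 := by
    rw [dotted_length _ hne, List.length_drop]
  rw [tl, getD_append']
  by_cases h1 : k < (dotted (cs.drop dr)).length
  · rw [if_pos h1, dotted_getD, getD_drop]
  · rw [if_neg h1, getD_replicate_dot]
    rw [hd] at h1
    by_cases h2 : k % 2 = 0
    · rw [if_pos h2, List.getD_eq_default _ _ (by omega)]
    · rw [if_neg h2]

theorem mirror_map (t : List Char) (n : Nat) (hn : 1 ≤ n) (ht : t.length = 2 * n - 1) :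
    (t.drop 1).reverse ++ t
      = (List.range (4 * n - 3)).map (fun c => t.getD (Nat.dist c (2 * n - 2)) '.') := by
  apply List.ext_getElem
  · simp [ht]; omega
  · intro c h1 h2
    simp only [List.length_map, List.length_range] at h2
    have hdist : Nat.dist c (2 * n - 2) < t.length := by
      simp only [Nat.dist, ht]; omega
    rw [List.getElem_map, List.getElem_range, List.getD_eq_getElem t '.' hdist]
    rw [List.getElem_append]
    split
    case isTrue hlt =>
      rw [List.getElem_reverse, List.getElem_drop]
      congr 1
      simp only [List.length_reverse, List.length_drop, Nat.dist, ht] at *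
      omega
    case isFalse hge =>
      congr 1
      simp only [List.length_reverse, List.length_drop, Nat.dist, ht] at *
      omega

theorem pyRepeat_dot (z : Int) : pyRepeat ['.'] z = List.replicate z.toNat '.' := by
  simp only [pyRepeat]
  generalize z.toNat = k
  induction k with
  | zero => simp
  | succ k ih => simp [List.replicate_succ, ih]

theorem revtail_getD (cs : List Char) (hn : 1 ≤ cs.length) (j : Nat) :
    (cs.reverse ++ cs.drop 1).getD j '.' = cs.getD (Nat.dist j (cs.length - 1)) '.' := by
  rw [getD_append']
  by_cases h : j < cs.length
  · rw [if_pos (by simpa using h)]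
    rw [List.getD_eq_getElem _ '.' (by simpa using h), List.getElem_reverse,
      List.getD_eq_getElem cs '.' (show Nat.dist j (cs.length - 1) < cs.length by
        simp only [Nat.dist]; omega)]
    congr 1
    simp only [Nat.dist]
    omega
  · rw [if_neg (by simpa using h)]
    simp only [List.length_reverse]
    rw [getD_drop]
    congr 1
    simp only [Nat.dist]
    omega

theorem mid_length (cs : List Char) (hn : 1 ≤ cs.length) :
    (midL cs).length = 4 * cs.length - 3 := by
  have hne : cs.reverse ++ cs.drop 1 ≠ [] :=
    List.ne_nil_of_length_pos (by simp; omega)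
  rw [midL, dotted_length _ hne]
  simp only [List.length_append, List.length_reverse, List.length_drop]
  omega

theorem mid_getD (cs : List Char) (hn : 1 ≤ cs.length) (k : Nat) :
    (midL cs).getD k '.'
      = if k % 2 = 0 then cs.getD (Nat.dist (k / 2) (cs.length - 1)) '.' else '.' := by
  rw [midL, dotted_getD, revtail_getD cs hn (k / 2)]

theorem rowNat_getD (cs : List Char) (dr : Nat) (hn1 : 1 ≤ cs.length) (hdr : dr < cs.length)
    (c : Nat) (_hc : c < 4 * cs.length - 3) :
    (List.replicate (2 * dr) '.' ++ (midL cs).take (2 * cs.length - 2 - 2 * dr)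
      ++ (midL cs).drop (2 * cs.length - 2 + 2 * dr) ++ List.replicate (2 * dr) '.').getD c '.'
    = (tl cs dr).getD (Nat.dist c (2 * cs.length - 2)) '.' := by
  have hmlen : (midL cs).length = 4 * cs.length - 3 := mid_length cs hn1
  rw [getD_append', getD_append', getD_append']
  rw [tl_getD cs dr hdr]
  simp only [List.length_append, List.length_replicate, List.length_take, List.length_drop, hmlen]
  rw [show min (2 * cs.length - 2 - 2 * dr) (4 * cs.length - 3) = 2 * cs.length - 2 - 2 * dr
        from by omega]
  by_cases h1 : c < 2 * dr
  · rw [if_pos (show c < 2 * dr + (2 * cs.length - 2 - 2 * dr)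
          + (4 * cs.length - 3 - (2 * cs.length - 2 + 2 * dr)) from by omega),
      if_pos (show c < 2 * dr + (2 * cs.length - 2 - 2 * dr) from by omega),
      if_pos h1, getD_replicate_dot]
    split_ifs with h2
    · rw [List.getD_eq_default _ _ (by simp only [Nat.dist] at h2 ⊢; omega)]
    · rfl
  · by_cases h2 : c < 2 * cs.length - 2
    · rw [if_pos (show c < 2 * dr + (2 * cs.length - 2 - 2 * dr)
            + (4 * cs.length - 3 - (2 * cs.length - 2 + 2 * dr)) from by omega),
        if_pos (show c < 2 * dr + (2 * cs.length - 2 - 2 * dr) from by omega),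
        if_neg h1, getD_take _ _ _ _ (by omega), mid_getD cs hn1]
      split_ifs with ha hb hb
      · congr 1
        simp only [Nat.dist] at *
        omega
      · exfalso; simp only [Nat.dist] at *; omega
      · exfalso; simp only [Nat.dist] at *; omega
      · rfl
    · by_cases h3 : c < 4 * cs.length - 3 - 2 * dr
      · rw [if_pos (show c < 2 * dr + (2 * cs.length - 2 - 2 * dr)
              + (4 * cs.length - 3 - (2 * cs.length - 2 + 2 * dr)) from by omega),
          if_neg (show ¬ c < 2 * dr + (2 * cs.length - 2 - 2 * dr) from by omega),
          getD_drop, mid_getD cs hn1]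
        rw [show 2 * cs.length - 2 + 2 * dr + (c - (2 * dr + (2 * cs.length - 2 - 2 * dr)))
              = c + 2 * dr from by omega]
        split_ifs with ha hb hb
        · congr 1
          simp only [Nat.dist] at *
          omega
        · exfalso; simp only [Nat.dist] at *; omega
        · exfalso; simp only [Nat.dist] at *; omega
        · rfl
      · rw [if_neg (show ¬ (c < 2 * dr + (2 * cs.length - 2 - 2 * dr)
              + (4 * cs.length - 3 - (2 * cs.length - 2 + 2 * dr))) from by omega),
          getD_replicate_dot]
        split_ifs with h4
        · rw [List.getD_eq_default _ _ (by simp only [Nat.dist] at h4 ⊢; omega)]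
        · rfl

theorem rowB_eq (cs : List Char) (hn1 : 1 ≤ cs.length) (dr : Nat) (hdr : dr < cs.length) :
    List.replicate (2 * dr) '.' ++ (midL cs).take (2 * cs.length - 2 - 2 * dr)
      ++ (midL cs).drop (2 * cs.length - 2 + 2 * dr) ++ List.replicate (2 * dr) '.'
    = Rrow cs dr := by
  simp only [Rrow]
  rw [mirror_map (tl cs dr) cs.length hn1 (tl_length cs dr hdr)]
  apply List.ext_getElem
  · simp [mid_length cs hn1]
    omega
  · intro c h1 h2
    simp only [List.length_map, List.length_range] at h2
    rw [List.getElem_map, List.getElem_range, ← List.getD_eq_getElem _ '.' h1]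
    exact rowNat_getD cs dr hn1 hdr c h2

theorem range_split {α : Type} (R : Nat → α) (m : Nat) :
    (List.range (2 * m + 1)).map (fun r => R (Nat.dist r m))
      = ((List.range m).map (fun r => R (m - r))) ++ [R 0]
        ++ ((List.range m).map (fun r => R (m - r))).reverse := by
  rw [show 2 * m + 1 = (m + 1) + m from by omega, List.range_add, List.map_append]
  congr 1
  · rw [List.range_succ, List.map_append]
    congr 1
    · apply List.map_congr_left
      intro r hr
      rw [List.mem_range] at hr
      congr 1
      simp only [Nat.dist]
      omega
    · simp [Nat.dist]
  · rw [List.map_map]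
    apply List.ext_getElem
    · simp
    · intro k h1 h2
      simp only [List.length_map, List.length_range, List.length_reverse] at h1 h2
      rw [List.getElem_map, List.getElem_range, List.getElem_reverse, List.getElem_map,
        List.getElem_range]
      simp only [List.length_map, List.length_range, Function.comp]
      congr 1
      simp only [Nat.dist]
      omega

theorem artRow_eq (cs : List Char) (i : Int) (h1 : 1 ≤ i) (h2 : i ≤ (cs.length : Int)) :
    artRow cs cs.length i = Rrow cs (cs.length - i.toNat) := by
  have hrep : pyRepeat ['.', '.'] ((cs.length : Int) - i)
      = List.replicate (2 * (cs.length - i.toNat)) '.' := by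
    simp only [pyRepeat]
    rw [show ((cs.length : Int) - i).toNat = cs.length - i.toNat from by omega]
    generalize cs.length - i.toNat = k
    induction k with
    | zero => simp
    | succ k ih =>
      rw [show 2 * (k + 1) = 2 * k + 1 + 1 from by omega]
      simp only [List.replicate_succ, List.flatten_cons]
      rw [ih]
      rfl
  simp only [artRow, Rrow, tl, dotted]
  rw [PySem.List.slice_from cs (by omega), hrep,
    show ((cs.length : Int) - i).toNat = cs.length - i.toNat from by omega]

theorem alt_eq_join (s : String) (hp : s ≠ "") :
    art_alt s = String.ofList (PySem.Chars.join ['\n']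
      (topRows s.toList
        ++ [artRow s.toList s.toList.length (s.toList.length : Int)]
        ++ (topRows s.toList).reverse)) := by
  have hcs : s.toList ≠ [] := fun h => hp (String.toList_eq_nil_iff.mp h)
  simp only [art_alt, topRows]
  generalize s.toList = cs at hcs ⊢
  have hn1 : 1 ≤ cs.length := List.length_pos_iff.mpr hcs
  have hmid : PySem.Chars.join ['.']
      ((((PySem.List.slice? cs none none (-1)).getD []) ++ PySem.List.slice cs (some 1) none).map
        (fun c => [c])) = midL cs := by
    rw [PySem.List.slice?_none_none_neg_one, Option.getD_some, PySem.List.slice_from_one]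
    simp only [midL, dotted, List.drop_one]
  congr 2
  rw [hmid]
  have hout : PySem.List.pyRange 0 (2 * (cs.length : Int) - 1) 1
      = (List.range (2 * cs.length - 1)).map (fun k : Nat => (k : Int)) := by
    rw [PySem.List.pyRange_one,
      show (2 * (cs.length : Int) - 1 - 0).toNat = 2 * cs.length - 1 from by omega]
    exact List.map_congr_left (fun k _ => by omega)
  rw [hout, List.map_map]
  have hrows : ∀ r ∈ List.range (2 * cs.length - 1),
      ((fun r => rowB (midL cs) (cs.length : Int) r) ∘ (fun k : Nat => (k : Int))) r
        = Rrow cs (Nat.dist r (cs.length - 1)) := by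
    intro r hr
    rw [List.mem_range] at hr
    simp only [Function.comp, rowB]
    have hdle : Nat.dist r (cs.length - 1) ≤ cs.length - 1 := by
      simp only [Nat.dist]; omega
    have habs : (2 : Int) * |(r : Int) - ((cs.length : Int) - 1)|
        = ((2 * Nat.dist r (cs.length - 1) : Nat) : Int) := by
      rw [show ((cs.length : Int) - 1) = ((cs.length - 1 : Nat) : Int) from by omega]
      push_cast [cast_dist]
      ring
    rw [habs, pyRepeat_dot, Int.toNat_natCast]
    rw [PySem.List.slice_to _ (show (0 : Int)
          ≤ 2 * (cs.length : Int) - 2 - ((2 * Nat.dist r (cs.length - 1) : Nat) : Int) from by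
        push_cast; omega)]
    rw [show (2 * (cs.length : Int) - 2 - ((2 * Nat.dist r (cs.length - 1) : Nat) : Int)).toNat
          = 2 * cs.length - 2 - 2 * Nat.dist r (cs.length - 1) from by omega]
    rw [PySem.List.slice_from _ (show (0 : Int)
          ≤ 2 * (cs.length : Int) - 2 + ((2 * Nat.dist r (cs.length - 1) : Nat) : Int) from by
        push_cast; omega)]
    rw [show (2 * (cs.length : Int) - 2 + ((2 * Nat.dist r (cs.length - 1) : Nat) : Int)).toNat
          = 2 * cs.length - 2 + 2 * Nat.dist r (cs.length - 1) from by omega]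
    exact rowB_eq cs hn1 _ (by omega)
  rw [List.map_congr_left hrows]
  rw [show 2 * cs.length - 1 = 2 * (cs.length - 1) + 1 from by omega,
    range_split (Rrow cs) (cs.length - 1)]
  have htop : (PySem.List.pyRange 1 (cs.length : Int) 1).map (artRow cs cs.length)
      = (List.range (cs.length - 1)).map (fun r => Rrow cs (cs.length - 1 - r)) := by
    rw [PySem.List.pyRange_one,
      show ((cs.length : Int) - 1).toNat = cs.length - 1 from by omega, List.map_map]
    apply List.map_congr_left
    intro k hk
    rw [List.mem_range] at hk
    simp only [Function.comp]
    rw [artRow_eq cs (1 + (k : Int)) (by omega) (by omega)]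
    congr 1
    rw [show ((1 : Int) + (k : Int)).toNat = 1 + k from by omega]
    omega
  have hmidrow : artRow cs cs.length ((cs.length : Int)) = Rrow cs 0 := by
    rw [artRow_eq cs (cs.length : Int) (by omega) (le_refl _)]
    congr 1
    omega
  rw [htop, hmidrow]

-- ===== VERDICT (by name: the statement is the Claim_ definition above) =====
theorem art_spec : Claim_equal_art := by
  intro s _ hp
  unfold Spec_art
  rw [art_eq_join s hp, alt_eq_join s hp]
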